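-- pv_equiv track=rewrite | github.com/sagnikc395/aoc2015 | day5/part1.py | threeOrMoreVowels
-- ===== SOURCE A (Python) =====
-- def threeOrMoreVowels(inputstr):
--     vowels = ['a','e','i','o','u']
--     count = 0
--
--     for index,val in enumerate(vowels):
--         count += inputstr.count(val)
--
--     if count >=3:
--         return  True
--     else:
--         return False
-- ===== SOURCE B (Python) =====
-- def threeOrMoreVowels(inputstr):
--     count = 0
--     for ch in inputstr:
--         if ch in 'aeiou':
--             count += 1
--             if count == 3:
--                 return True
--     return False
-- ===== Notes on version B (the rewrite author's own statement) =====
-- stated objective: idiomatic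
-- what changed: Replaced A's five separate full-string str.count scans (one per vowel) plus a final comparison with a single early-exit pass that increments one counter on vowel characters and returns True as soon as it reaches 3.
import Mathlib
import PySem

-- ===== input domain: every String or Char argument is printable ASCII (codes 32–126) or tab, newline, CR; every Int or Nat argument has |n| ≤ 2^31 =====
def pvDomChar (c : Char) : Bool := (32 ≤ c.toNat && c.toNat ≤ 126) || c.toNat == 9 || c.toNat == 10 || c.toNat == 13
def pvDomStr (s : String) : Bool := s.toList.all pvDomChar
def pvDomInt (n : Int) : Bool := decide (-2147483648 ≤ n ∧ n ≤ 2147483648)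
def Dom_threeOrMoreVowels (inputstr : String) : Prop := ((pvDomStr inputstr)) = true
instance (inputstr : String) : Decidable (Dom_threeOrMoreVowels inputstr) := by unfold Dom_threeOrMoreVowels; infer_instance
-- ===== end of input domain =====

-- B replaces A's five separate str.count scans by one early-exit pass over the string (objective: idiomatic single pass).

-- ===== PORT A =====
-- for index,val in enumerate(vowels): count += inputstr.count(val)
def threeOrMoreVowels (inputstr : String) : Bool :=
  let vowels : List Char := ['a', 'e', 'i', 'o', 'u']
  let count : Int :=
    (PySem.List.enumerate vowels).foldl
      (fun acc iv => acc + (PySem.Str.count inputstr (String.ofList [iv.2]) : Int)) 0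
  if count ≥ 3 then true else false

-- ===== PORT B =====
-- single pass: for ch in inputstr: if ch in 'aeiou': count += 1; if count == 3: return True
def pvAltGo : List Char → Int → Bool
  | [], _ => false
  | ch :: rest, count =>
    if PySem.Chars.isIn [ch] ("aeiou".toList) then
      if count + 1 = 3 then true else pvAltGo rest (count + 1)
    else pvAltGo rest count

def threeOrMoreVowels_alt (inputstr : String) : Bool :=
  pvAltGo inputstr.toList 0

-- ===== PRECONDITION & SPEC =====
def Spec_threeOrMoreVowels (inputstr : String) (out : Bool) : Prop := out = threeOrMoreVowels_alt inputstr
instance (inputstr : String) (out : Bool) : Decidable (Spec_threeOrMoreVowels inputstr out) := by unfold Spec_threeOrMoreVowels; infer_instance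

-- ===== CLAIM (what is proved, stated in full; the proofs are below) =====
def Claim_equal_threeOrMoreVowels : Prop := ∀ (inputstr : String), Dom_threeOrMoreVowels inputstr → Spec_threeOrMoreVowels inputstr (threeOrMoreVowels inputstr)

-- ===== LEMMAS AND PROOFS =====

-- `count.go` with a single-character needle counts occurrences of that character.
theorem pvGo_single (c : Char) : ∀ (fuel : ℕ) (s : List Char) (acc : ℕ), s.length ≤ fuel →
    PySem.Chars.count.go [c] fuel s acc = acc + s.count c := by
  intro fuel
  induction fuel with
  | zero => intro s acc h; cases s with
    | nil => simp [PySem.Chars.count.go]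
    | cons a t => simp at h
  | succ n ih => intro s acc h; cases s with
    | nil => simp [PySem.Chars.count.go]
    | cons a t =>
      simp only [PySem.Chars.count.go]
      by_cases hc : c = a
      · subst hc
        simp [List.isPrefixOf, ih t (acc + 1) (by simpa using h)]
        omega
      · simp [List.isPrefixOf, hc, ih t acc (by simpa using h), Ne.symm hc]

theorem pvCount_single (s : List Char) (c : Char) :
    PySem.Chars.count s [c] = s.count c := by
  simp [PySem.Chars.count, pvGo_single c s.length s 0 le_rfl]

-- 'ch in "aeiou"' on a single character is membership in the vowel list.
theorem pvIsIn_singleton (c : Char) :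
    PySem.Chars.isIn [c] ("aeiou".toList) = decide (c ∈ (['a', 'e', 'i', 'o', 'u'] : List Char)) := by
  rw [Bool.eq_iff_iff, PySem.Chars.isIn_iff_infix, List.singleton_infix_iff,
    show ("aeiou".toList) = (['a', 'e', 'i', 'o', 'u'] : List Char) from by decide]
  simp

-- the five per-vowel counts sum to one membership count
theorem pvSum5 (cs : List Char) :
    cs.count 'a' + cs.count 'e' + cs.count 'i' + cs.count 'o' + cs.count 'u'
      = cs.countP (fun c => decide (c ∈ (['a', 'e', 'i', 'o', 'u'] : List Char))) := by
  induction cs with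
  | nil => rfl
  | cons c t ih =>
    simp only [List.count_cons, List.countP_cons, List.mem_cons, List.not_mem_nil, or_false]
    by_cases h1 : c = 'a' <;> by_cases h2 : c = 'e' <;> by_cases h3 : c = 'i' <;>
      by_cases h4 : c = 'o' <;> by_cases h5 : c = 'u' <;>
        simp_all <;> omega

-- B's loop returns whether the running count reaches 3
theorem pvAltGo_eq : ∀ (cs : List Char) (count : Int), count < 3 →
    pvAltGo cs count
      = decide (3 ≤ count + (cs.countP (fun c => decide (c ∈ (['a', 'e', 'i', 'o', 'u'] : List Char))) : Int)) := by
  intro cs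
  induction cs with
  | nil => intro count h; simp [pvAltGo]; omega
  | cons c t ih =>
    intro count h
    simp only [pvAltGo, pvIsIn_singleton, List.countP_cons]
    by_cases hm : c ∈ (['a', 'e', 'i', 'o', 'u'] : List Char)
    · simp only [hm, decide_true, if_true]
      by_cases h3 : count + 1 = 3
      · simp [h3]
        omega
      · rw [if_neg h3, ih (count + 1) (by omega)]
        simp only [decide_eq_decide]
        push_cast
        omega
    · simp only [hm, decide_false, ih count h]
      simp

theorem threeOrMoreVowels_eq (inputstr : String) :
    threeOrMoreVowels inputstr = threeOrMoreVowels_alt inputstr := by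
  unfold threeOrMoreVowels threeOrMoreVowels_alt
  rw [pvAltGo_eq inputstr.toList 0 (by omega)]
  simp only [PySem.List.enumerate, List.foldl, PySem.Str.count, String.toList_ofList, pvCount_single]
  rw [← pvSum5 inputstr.toList]
  simp only [ge_iff_le]
  rw [if_congr (Iff.rfl) rfl rfl]
  split_ifs with h
  · symm; simpa using by omega
  · symm; simpa using by omega

-- ===== VERDICT (by name: the statement is the Claim_ definition above) =====
theorem threeOrMoreVowels_spec : Claim_equal_threeOrMoreVowels := by
  intro s _
  exact threeOrMoreVowels_eq s
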